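-- pv_equiv track=rewrite | github.com/SynteraLab/Python_Automation_Scripts | universal_downloader fix/intelligence/service_resolution/normalization.py | _strip_common_suffixes
-- ===== SOURCE A (Python) =====
-- _STRIP_SUFFIXES: tuple[str, ...] = (
--     "player",
--     "stream",
--     "server",
--     "hoster",
--     "embed",
--     "video",
--     "cdn",
--     "hub",
-- )
--
-- def _strip_common_suffixes(label: str) -> str:
--     """
--     Remove trailing filler words that do not contribute to identity.
--
--     Example: ``'voeserver'`` → ``'voe'``,  ``'filemoonplayer'`` → ``'filemoon'``
--
--     Only strips if the remaining prefix is at least 2 characters long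
--     to avoid accidentally stripping the entire label.
--     """
--     changed = True
--     while changed:
--         changed = False
--         for suffix in _STRIP_SUFFIXES:
--             if label.endswith(suffix) and len(label) > len(suffix) + 1:
--                 label = label[: -len(suffix)]
--                 changed = True
--                 break  # restart from longest suffixes
--     return label
-- ===== SOURCE B (Python) =====
-- # B: recursive formulation with a last-character dispatch table: candidate
-- # suffixes are looked up by the label's final character instead of scanning the
-- # whole suffix tuple, and each successful strip restarts via tail recursion.
-- _SUFFIXES_BY_LAST_CHAR: dict[str, tuple[str, ...]] = {
--     "r": ("player", "server", "hoster"),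
--     "m": ("stream",),
--     "d": ("embed",),
--     "o": ("video",),
--     "n": ("cdn",),
--     "b": ("hub",),
-- }
--
--
-- def _strip_common_suffixes(label: str) -> str:
--     for word in _SUFFIXES_BY_LAST_CHAR.get(label[-1:], ()):
--         if label.endswith(word) and len(label) > len(word) + 1:
--             return _strip_common_suffixes(label[: -len(word)])
--     return label
-- ===== Notes on version B (the rewrite author's own statement) =====
-- stated objective: alternative
-- what changed: B replaces A's while-changed fixpoint loop that rescans the whole 8-word suffix tuple each round with a recursive function that looks the (at most 3) candidate suffixes up in a dict keyed by the label's last character; correctness uses that a suffix not ending in the label's last character can never match.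
import Mathlib
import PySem

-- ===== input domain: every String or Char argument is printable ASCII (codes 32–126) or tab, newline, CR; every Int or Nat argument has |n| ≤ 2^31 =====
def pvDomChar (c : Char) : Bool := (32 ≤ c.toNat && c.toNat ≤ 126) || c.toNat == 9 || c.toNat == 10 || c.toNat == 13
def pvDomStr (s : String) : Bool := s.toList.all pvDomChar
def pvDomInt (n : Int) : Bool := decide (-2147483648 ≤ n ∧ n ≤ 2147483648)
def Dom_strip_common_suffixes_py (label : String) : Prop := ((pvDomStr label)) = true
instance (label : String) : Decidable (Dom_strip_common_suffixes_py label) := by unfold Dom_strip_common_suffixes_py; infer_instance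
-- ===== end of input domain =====

-- B replaces A's while-changed fixpoint scan of the whole suffix tuple by a recursive
-- function that looks the candidate suffixes up in a dict keyed by the label's last character.

-- ===== PORT A =====
def pvSuffixesA : List String :=
  ["player", "stream", "server", "hoster", "embed", "video", "cdn", "hub"]

-- the body of A's 'for suffix in _STRIP_SUFFIXES: … break': first matching suffix strips
def pvPassA (label : String) : List String → String × Bool
  | [] => (label, false)
  | suf :: rest =>
    if PySem.Str.endswith label suf && decide (PySem.Str.len label > PySem.Str.len suf + 1) then
      (PySem.Str.slice label none (some (-(PySem.Str.len suf))), true)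
    else pvPassA label rest

-- used by pvLoopA's decreasing_by: a successful pass shortens the label
theorem pvPassA_shrinks (sufs : List String) (label l' : String)
    (hs : ∀ s ∈ sufs, 0 < s.toList.length)
    (h : pvPassA label sufs = (l', true)) : l'.toList.length < label.toList.length := by
  induction sufs with
  | nil => simp [pvPassA] at h
  | cons suf rest ih =>
    rw [pvPassA] at h
    split at h
    · rename_i hc
      simp only [Bool.and_eq_true, decide_eq_true_eq] at hc
      obtain ⟨-, hlen⟩ := hc
      obtain ⟨rfl, -⟩ := Prod.mk.injEq .. ▸ h
      have hk : 0 < suf.toList.length := hs suf (by simp)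
      simp only [PySem.Str.len] at hlen
      have : (PySem.Str.slice label none (some (-(PySem.Str.len suf)))).toList
          = label.toList.take (label.toList.length - suf.toList.length) := by
        simp only [PySem.Str.len]
        simp [PySem.List.slice_to_neg_natCast label.toList suf.length (by simpa using hk)]
      rw [this]
      simp only [List.length_take]
      omega
    · exact ih (fun s hm => hs s (by simp [hm])) h

-- A's 'while changed' fixpoint loop
def pvLoopA (label : String) : String :=
  match h : pvPassA label pvSuffixesA with
  | (l', true) => pvLoopA l'
  | (_, false) => label
termination_by label.toList.length
decreasing_by
  exact pvPassA_shrinks pvSuffixesA label l' (by decide) h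

def strip_common_suffixes_py (label : String) : String := pvLoopA label

-- ===== PORT B =====
-- the dispatch table _SUFFIXES_BY_LAST_CHAR (keys are one-character strings, as in Source B)
def pvByLastB : PySem.Dict String (List String) :=
  PySem.Dict.ofList
    [("r", ["player", "server", "hoster"]), ("m", ["stream"]), ("d", ["embed"]),
     ("o", ["video"]), ("n", ["cdn"]), ("b", ["hub"])]

-- used by the mutual block's decreasing_by: the strict length guard keeps the stripped label shorter
theorem pvStripSlice_lt (label w : String)
    (h : PySem.Str.len label > PySem.Str.len w + 1) :
    (PySem.Str.slice label none (some (-(PySem.Str.len w)))).toList.length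
      < label.toList.length := by
  have hlen : label.toList.length > w.toList.length + 1 := by
    simp only [PySem.Str.len] at h; exact_mod_cast h
  rcases Nat.eq_zero_or_pos w.toList.length with h0 | hpos
  · have : PySem.Str.len w = ((0 : Nat) : Int) := by simp [PySem.Str.len, h0]
    rw [this]
    simp only [PySem.Str.toList_slice, PySem.Chars.slice_eq_listSlice]
    rw [show -(((0 : Nat) : Int)) = ((0 : Nat) : Int) from by omega,
        PySem.List.slice_to_natCast]
    simp only [List.take_zero, List.length_nil]
    omega
  · have : PySem.Str.len w = ((w.toList.length : Nat) : Int) := by simp [PySem.Str.len]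
    rw [this]
    simp only [PySem.Str.toList_slice, PySem.Chars.slice_eq_listSlice]
    rw [PySem.List.slice_to_neg_natCast label.toList w.toList.length hpos]
    simp only [List.length_take]
    omega

mutual
-- B: '_strip_common_suffixes' — look the bucket up by the last character, then scan it
def strip_common_suffixes_py_alt (label : String) : String :=
  pvScanB label (PySem.Dict.getD pvByLastB (PySem.Str.slice label (some (-1)) none) [])
termination_by (label.toList.length, 1, 0)
decreasing_by
  simp_wf
  exact Prod.Lex.right _ (Prod.Lex.left _ _ Nat.zero_lt_one)

-- B's 'for word in bucket' with early 'return _strip_common_suffixes(label[:-len(word)])'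
def pvScanB (label : String) (cands : List String) : String :=
  match cands with
  | [] => label
  | w :: rest =>
    if h : PySem.Str.endswith label w && decide (PySem.Str.len label > PySem.Str.len w + 1) then
      strip_common_suffixes_py_alt (PySem.Str.slice label none (some (-(PySem.Str.len w))))
    else pvScanB label rest
termination_by (label.toList.length, 0, cands.length)
decreasing_by
  · simp_wf
    have h2 : PySem.Str.len label > PySem.Str.len w + 1 := by
      simp only [Bool.and_eq_true, decide_eq_true_eq] at h; exact h.2
    exact Prod.Lex.left _ _ (by
      simpa [PySem.Str.len, PySem.Str.toList_slice, PySem.Chars.slice_eq_listSlice]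
        using pvStripSlice_lt label w h2)
  · simp_wf
    exact Prod.Lex.right _ (Prod.Lex.right _ (Nat.lt_succ_self _))
end

-- ===== PRECONDITION & SPEC =====
def Spec_strip_common_suffixes_py (label : String) (out : String) : Prop := out = strip_common_suffixes_py_alt label
instance (label : String) (out : String) : Decidable (Spec_strip_common_suffixes_py label out) := by unfold Spec_strip_common_suffixes_py; infer_instance

-- ===== CLAIM (what is proved, stated in full; the proofs are below) =====
def Claim_equal_strip_common_suffixes_py : Prop := ∀ (label : String), Dom_strip_common_suffixes_py label → Spec_strip_common_suffixes_py label (strip_common_suffixes_py label)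

-- ===== LEMMAS AND PROOFS =====

-- a word that does not end in the label's last character cannot be a suffix of the label
theorem pv_endswith_ne (label w : String) (hw : w.toList ≠ [])
    (h : PySem.Str.slice label (some (-1)) none ≠ PySem.Str.slice w (some (-1)) none) :
    PySem.Str.endswith label w = false := by
  cases hE : PySem.Str.endswith label w with
  | false => rfl
  | true =>
    exfalso
    apply h
    have hsuf : w.toList <:+ label.toList := by
      apply (PySem.Chars.endswith_iff _ _).mp
      simpa using hE
    obtain ⟨p, hp⟩ := hsuf
    obtain ⟨q, c, hqc⟩ : ∃ q c, w.toList = q ++ [c] :=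
      ⟨w.toList.dropLast, w.toList.getLast hw, (List.dropLast_append_getLast hw).symm⟩
    have e2 : (PySem.Str.slice w (some (-1)) none).toList = [c] := by
      simp only [PySem.Str.toList_slice, PySem.Chars.slice_eq_listSlice,
        PySem.List.slice_from_neg_one, hqc]
      rw [show (q ++ [c]).length - 1 = q.length from by simp]
      exact List.drop_left
    have e1 : (PySem.Str.slice label (some (-1)) none).toList = [c] := by
      simp only [PySem.Str.toList_slice, PySem.Chars.slice_eq_listSlice,
        PySem.List.slice_from_neg_one]
      rw [← hp, hqc, show p ++ (q ++ [c]) = (p ++ q) ++ [c] from by simp,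
        show ((p ++ q) ++ [c]).length - 1 = (p ++ q).length from by simp]
      exact List.drop_left
    have := congrArg String.ofList (e1.trans e2.symm)
    rwa [String.ofList_toList, String.ofList_toList] at this

-- a word whose 'endswith' test is false is skipped by A's pass
theorem pvPassA_skip (label w : String) (rest : List String)
    (hw : PySem.Str.endswith label w = false) :
    pvPassA label (w :: rest) = pvPassA label rest := by
  rw [pvPassA, hw]
  simp

-- A's pass only looks at the head word and the rest independently
theorem pvPassA_cons_congr (label w : String) (r1 r2 : List String)
    (h : pvPassA label r1 = pvPassA label r2) :
    pvPassA label (w :: r1) = pvPassA label (w :: r2) := by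
  rw [pvPassA, pvPassA, h]

-- B's bucket scan is A's pass over the bucket, followed by the restart
theorem pv_scan_bridge (cands : List String) (label : String) :
    pvScanB label cands =
      match pvPassA label cands with
      | (l', true) => strip_common_suffixes_py_alt l'
      | (_, false) => label := by
  induction cands with
  | nil => rw [pvScanB]; simp [pvPassA]
  | cons w rest ih =>
    rw [pvScanB, pvPassA]
    by_cases hc : (PySem.Str.endswith label w && decide (PySem.Str.len label > PySem.Str.len w + 1)) = true
    · rw [dif_pos hc, if_pos hc]
    · rw [dif_neg hc, if_neg hc, ih]

-- A's pass over the full suffix tuple equals A's pass over B's last-character bucket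
theorem pv_pass_bucket (label : String) :
    pvPassA label pvSuffixesA
      = pvPassA label
          (PySem.Dict.getD pvByLastB (PySem.Str.slice label (some (-1)) none) []) := by
  rw [show pvSuffixesA = ["player", "stream", "server", "hoster", "embed", "video", "cdn", "hub"] from rfl]
  by_cases hr : PySem.Str.slice label (some (-1)) none = "r"
  · rw [show PySem.Dict.getD pvByLastB (PySem.Str.slice label (some (-1)) none) []
        = ["player", "server", "hoster"] from by rw [hr]; decide]
    apply pvPassA_cons_congr
    rw [pvPassA_skip label "stream" _ (pv_endswith_ne label _ (by decide) (by rw [hr]; decide))]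
    apply pvPassA_cons_congr
    apply pvPassA_cons_congr
    rw [pvPassA_skip label "embed" _ (pv_endswith_ne label _ (by decide) (by rw [hr]; decide)),
        pvPassA_skip label "video" _ (pv_endswith_ne label _ (by decide) (by rw [hr]; decide)),
        pvPassA_skip label "cdn" _ (pv_endswith_ne label _ (by decide) (by rw [hr]; decide)),
        pvPassA_skip label "hub" _ (pv_endswith_ne label _ (by decide) (by rw [hr]; decide))]
  by_cases hm : PySem.Str.slice label (some (-1)) none = "m"
  · rw [show PySem.Dict.getD pvByLastB (PySem.Str.slice label (some (-1)) none) []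
        = ["stream"] from by rw [hm]; decide]
    rw [pvPassA_skip label "player" _ (pv_endswith_ne label _ (by decide) (by rw [hm]; decide))]
    apply pvPassA_cons_congr
    rw [pvPassA_skip label "server" _ (pv_endswith_ne label _ (by decide) (by rw [hm]; decide)),
        pvPassA_skip label "hoster" _ (pv_endswith_ne label _ (by decide) (by rw [hm]; decide)),
        pvPassA_skip label "embed" _ (pv_endswith_ne label _ (by decide) (by rw [hm]; decide)),
        pvPassA_skip label "video" _ (pv_endswith_ne label _ (by decide) (by rw [hm]; decide)),
        pvPassA_skip label "cdn" _ (pv_endswith_ne label _ (by decide) (by rw [hm]; decide)),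
        pvPassA_skip label "hub" _ (pv_endswith_ne label _ (by decide) (by rw [hm]; decide))]
  by_cases hd : PySem.Str.slice label (some (-1)) none = "d"
  · rw [show PySem.Dict.getD pvByLastB (PySem.Str.slice label (some (-1)) none) []
        = ["embed"] from by rw [hd]; decide]
    rw [pvPassA_skip label "player" _ (pv_endswith_ne label _ (by decide) (by rw [hd]; decide)),
        pvPassA_skip label "stream" _ (pv_endswith_ne label _ (by decide) (by rw [hd]; decide)),
        pvPassA_skip label "server" _ (pv_endswith_ne label _ (by decide) (by rw [hd]; decide)),
        pvPassA_skip label "hoster" _ (pv_endswith_ne label _ (by decide) (by rw [hd]; decide))]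
    apply pvPassA_cons_congr
    rw [pvPassA_skip label "video" _ (pv_endswith_ne label _ (by decide) (by rw [hd]; decide)),
        pvPassA_skip label "cdn" _ (pv_endswith_ne label _ (by decide) (by rw [hd]; decide)),
        pvPassA_skip label "hub" _ (pv_endswith_ne label _ (by decide) (by rw [hd]; decide))]
  by_cases ho : PySem.Str.slice label (some (-1)) none = "o"
  · rw [show PySem.Dict.getD pvByLastB (PySem.Str.slice label (some (-1)) none) []
        = ["video"] from by rw [ho]; decide]
    rw [pvPassA_skip label "player" _ (pv_endswith_ne label _ (by decide) (by rw [ho]; decide)),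
        pvPassA_skip label "stream" _ (pv_endswith_ne label _ (by decide) (by rw [ho]; decide)),
        pvPassA_skip label "server" _ (pv_endswith_ne label _ (by decide) (by rw [ho]; decide)),
        pvPassA_skip label "hoster" _ (pv_endswith_ne label _ (by decide) (by rw [ho]; decide)),
        pvPassA_skip label "embed" _ (pv_endswith_ne label _ (by decide) (by rw [ho]; decide))]
    apply pvPassA_cons_congr
    rw [pvPassA_skip label "cdn" _ (pv_endswith_ne label _ (by decide) (by rw [ho]; decide)),
        pvPassA_skip label "hub" _ (pv_endswith_ne label _ (by decide) (by rw [ho]; decide))]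
  by_cases hn : PySem.Str.slice label (some (-1)) none = "n"
  · rw [show PySem.Dict.getD pvByLastB (PySem.Str.slice label (some (-1)) none) []
        = ["cdn"] from by rw [hn]; decide]
    rw [pvPassA_skip label "player" _ (pv_endswith_ne label _ (by decide) (by rw [hn]; decide)),
        pvPassA_skip label "stream" _ (pv_endswith_ne label _ (by decide) (by rw [hn]; decide)),
        pvPassA_skip label "server" _ (pv_endswith_ne label _ (by decide) (by rw [hn]; decide)),
        pvPassA_skip label "hoster" _ (pv_endswith_ne label _ (by decide) (by rw [hn]; decide)),
        pvPassA_skip label "embed" _ (pv_endswith_ne label _ (by decide) (by rw [hn]; decide)),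
        pvPassA_skip label "video" _ (pv_endswith_ne label _ (by decide) (by rw [hn]; decide))]
    apply pvPassA_cons_congr
    rw [pvPassA_skip label "hub" _ (pv_endswith_ne label _ (by decide) (by rw [hn]; decide))]
  by_cases hb : PySem.Str.slice label (some (-1)) none = "b"
  · rw [show PySem.Dict.getD pvByLastB (PySem.Str.slice label (some (-1)) none) []
        = ["hub"] from by rw [hb]; decide]
    rw [pvPassA_skip label "player" _ (pv_endswith_ne label _ (by decide) (by rw [hb]; decide)),
        pvPassA_skip label "stream" _ (pv_endswith_ne label _ (by decide) (by rw [hb]; decide)),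
        pvPassA_skip label "server" _ (pv_endswith_ne label _ (by decide) (by rw [hb]; decide)),
        pvPassA_skip label "hoster" _ (pv_endswith_ne label _ (by decide) (by rw [hb]; decide)),
        pvPassA_skip label "embed" _ (pv_endswith_ne label _ (by decide) (by rw [hb]; decide)),
        pvPassA_skip label "video" _ (pv_endswith_ne label _ (by decide) (by rw [hb]; decide)),
        pvPassA_skip label "cdn" _ (pv_endswith_ne label _ (by decide) (by rw [hb]; decide))]
  · have hbucket : PySem.Dict.getD pvByLastB (PySem.Str.slice label (some (-1)) none) [] = [] := by
      apply PySem.Dict.getD_of_not_contains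
      rw [show pvByLastB = PySem.Dict.mk
        [("r", ["player", "server", "hoster"]), ("m", ["stream"]), ("d", ["embed"]),
         ("o", ["video"]), ("n", ["cdn"]), ("b", ["hub"])] from rfl]
      simp only [PySem.Dict.contains_mk]
      simp [Ne.symm hr, Ne.symm hm, Ne.symm hd, Ne.symm ho,
        Ne.symm hn, Ne.symm hb]
    rw [hbucket]
    rw [pvPassA_skip label "player" _ (pv_endswith_ne label _ (by decide)
          (fun hc => hr (hc.trans (by decide)))),
        pvPassA_skip label "stream" _ (pv_endswith_ne label _ (by decide)
          (fun hc => hm (hc.trans (by decide)))),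
        pvPassA_skip label "server" _ (pv_endswith_ne label _ (by decide)
          (fun hc => hr (hc.trans (by decide)))),
        pvPassA_skip label "hoster" _ (pv_endswith_ne label _ (by decide)
          (fun hc => hr (hc.trans (by decide)))),
        pvPassA_skip label "embed" _ (pv_endswith_ne label _ (by decide)
          (fun hc => hd (hc.trans (by decide)))),
        pvPassA_skip label "video" _ (pv_endswith_ne label _ (by decide)
          (fun hc => ho (hc.trans (by decide)))),
        pvPassA_skip label "cdn" _ (pv_endswith_ne label _ (by decide)
          (fun hc => hn (hc.trans (by decide)))),
        pvPassA_skip label "hub" _ (pv_endswith_ne label _ (by decide)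
          (fun hc => hb (hc.trans (by decide))))]

theorem pv_main_aux (n : Nat) : ∀ label : String, label.toList.length = n →
    pvLoopA label = strip_common_suffixes_py_alt label := by
  induction n using Nat.strong_induction_on with
  | _ n ih =>
    intro label hlen
    rw [pvLoopA, strip_common_suffixes_py_alt, pv_scan_bridge, ← pv_pass_bucket]
    cases hP : pvPassA label pvSuffixesA with
    | mk l' b =>
      cases b with
      | false => rfl
      | true =>
        have hlt := pvPassA_shrinks pvSuffixesA label l' (by decide) hP
        exact ih l'.toList.length (by omega) l' rfl

theorem pv_main (label : String) : pvLoopA label = strip_common_suffixes_py_alt label :=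
  pv_main_aux label.toList.length label rfl

-- ===== VERDICT (by name: the statement is the Claim_ definition above) =====
theorem strip_common_suffixes_py_spec : Claim_equal_strip_common_suffixes_py := by
  intro label _
  unfold Spec_strip_common_suffixes_py strip_common_suffixes_py
  exact pv_main label
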